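-- pv_equiv track=rewrite | github.com/hz920120/leetcode_python | Aug_2022/no_1374.py | generateTheString
-- ===== SOURCE A (Python) =====
-- def generateTheString(n):
--     """
--     :type n: int
--     :rtype: str
--     """
--     if n <= 0:
--         return ''
--     even = False
--     if n % 2 == 0:
--         even = True
--     res = '' if even else 'm'
--     for i in range(n-1):
--         if i == 0:
--             res += 'x'
--         elif i != 0:
--             res += 'y'
--     return res + 'y' if even else res
-- ===== SOURCE B (Python) =====
-- def generateTheString(n):
--     """
--     :type n: int
--     :rtype: str
--     """
--     if n <= 0:
--         return ''
--     if n == 1: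
--         return 'm'
--     if n % 2 == 0:
--         return 'x' + 'y' * (n - 1)
--     return 'mx' + 'y' * (n - 2)
-- ===== Notes on version B (the rewrite author's own statement) =====
-- stated objective: simpler
-- what changed: Replaces A's per-character accumulation loop with parity flag by a direct closed-form construction ('x'+'y'*(n-1) for even n, 'mx'+'y'*(n-2) for odd n>1); measured faster since it avoids repeated string concatenation.
import Mathlib
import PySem

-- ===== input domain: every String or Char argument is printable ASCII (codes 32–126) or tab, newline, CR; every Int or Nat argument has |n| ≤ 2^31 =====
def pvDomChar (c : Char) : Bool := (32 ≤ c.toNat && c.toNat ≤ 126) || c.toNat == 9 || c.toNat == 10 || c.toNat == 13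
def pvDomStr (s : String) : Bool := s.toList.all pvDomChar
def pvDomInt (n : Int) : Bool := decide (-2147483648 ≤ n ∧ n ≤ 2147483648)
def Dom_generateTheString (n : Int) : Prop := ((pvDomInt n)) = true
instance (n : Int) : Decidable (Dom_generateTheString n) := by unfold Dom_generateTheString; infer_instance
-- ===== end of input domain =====

-- B replaces A's per-character accumulation loop by a closed-form construction with string multiplication (simpler, measured faster).

-- ===== PORT A =====
def generateTheString (n : Int) : String :=
  if n ≤ 0 then "" else
  let even := PySem.Int.mod n 2 == 0
  let res : String := if even then "" else "m"
  let res := (PySem.List.pyRange 0 (n - 1) 1).foldl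
    (fun r i => if i == 0 then r ++ "x" else if i != 0 then r ++ "y" else r) res
  if even then res ++ "y" else res

-- ===== PORT B =====
def generateTheString_alt (n : Int) : String :=
  if n ≤ 0 then "" else
  if n == 1 then "m" else
  if PySem.Int.mod n 2 == 0 then "x" ++ String.ofList (List.replicate (n - 1).toNat 'y')
  else "mx" ++ String.ofList (List.replicate (n - 2).toNat 'y')

-- ===== PRECONDITION & SPEC =====
def Spec_generateTheString (n : Int) (out : String) : Prop := out = generateTheString_alt n
instance (n : Int) (out : String) : Decidable (Spec_generateTheString n out) := by unfold Spec_generateTheString; infer_instance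

-- ===== CLAIM (what is proved, stated in full; the proofs are below) =====
def Claim_equal_generateTheString : Prop := ∀ (n : Int), Dom_generateTheString n → Spec_generateTheString n (generateTheString n)

-- ===== LEMMAS AND PROOFS =====

-- the body of A's loop, named for the lemmas
def pvStepA (r : String) (i : Int) : String :=
  if i == 0 then r ++ "x" else if i != 0 then r ++ "y" else r

-- the characters A's loop over range(k) appends: nothing for k = 0, else 'x' then (k-1) 'y's
def pvTail : Nat → List Char
  | 0 => []
  | Nat.succ j => 'x' :: List.replicate j 'y'

-- A's loop over range(k) starting from s appends pvTail k
theorem pvFoldA (k : Nat) (s : String) :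
    (PySem.List.pyRange 0 (k : Int) 1).foldl pvStepA s = s ++ String.ofList (pvTail k) := by
  induction k generalizing s with
  | zero =>
    rw [PySem.List.pyRange_one_eq_nil (by norm_num)]
    apply String.ext
    simp [pvTail]
  | succ k ih =>
    rw [show ((k + 1 : Nat) : Int) = (k : Int) + 1 by push_cast; ring,
        PySem.List.pyRange_one_succ_right (by positivity), List.foldl_append, ih]
    cases k with
    | zero =>
      apply String.ext
      simp [pvStepA, pvTail]
    | succ j =>
      simp only [List.foldl_cons, List.foldl_nil, pvStepA, pvTail]
      have h0 : (((j + 1 : Nat) : Int) == 0) = false := by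
        simp only [beq_eq_false_iff_ne, ne_eq]; omega
      have h1 : (((j + 1 : Nat) : Int) != 0) = true := by
        simp only [bne_iff_ne, ne_eq]; omega
      simp only [h0, h1, if_true, if_false, Bool.false_eq_true]
      apply String.ext
      simp [List.replicate_succ', List.cons_append]

-- ===== VERDICT (by name: the statement is the Claim_ definition above) =====
theorem generateTheString_spec : Claim_equal_generateTheString := by
  intro n _
  unfold Spec_generateTheString generateTheString generateTheString_alt
  by_cases hle : n ≤ 0
  · simp [hle]
  · simp only [if_neg hle]
    have hmod : PySem.Int.mod n 2 = n % 2 := by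
      simp [PySem.Int.mod, Int.fmod_eq_emod]
    have hcast : n - 1 = (((n - 1).toNat : Nat) : Int) := by omega
    have hfold := pvFoldA (n - 1).toNat
    rw [← hcast] at hfold
    have hstep : ∀ s : String, (PySem.List.pyRange 0 (n - 1) 1).foldl
        (fun r i => if i == 0 then r ++ "x" else if i != 0 then r ++ "y" else r) s
        = (PySem.List.pyRange 0 (n - 1) 1).foldl pvStepA s := fun _ => rfl
    rw [hstep, hfold]
    by_cases h1 : n = 1
    · subst h1
      decide
    · have hn2 : 2 ≤ n := by omega
      rw [if_neg (show ¬((n == 1) = true) by simp [h1])]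
      by_cases hev : n % 2 = 0
      · have heq : (PySem.Int.mod n 2 == 0) = true := by
          rw [beq_iff_eq, hmod]; exact hev
        simp only [heq, if_true]
        have hk : (n - 1).toNat = (n - 2).toNat + 1 := by omega
        rw [hk]
        apply String.ext
        simp [pvTail, List.replicate_succ']
      · have heq : (PySem.Int.mod n 2 == 0) = false := by
          rw [beq_eq_false_iff_ne, ne_eq, hmod]; exact hev
        simp only [heq, Bool.false_eq_true, if_false]
        have hk : (n - 1).toNat = (n - 2).toNat + 1 := by omega
        rw [hk]
        apply String.ext
        simp [pvTail]
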